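-- pv_equiv track=rewrite | github.com/andrijr/pythonPWN | d3_1_methods/p64_changeColour.py | generateHtmlSpanCodeWithBackground
-- ===== SOURCE A (Python) =====
-- def generateHtmlSpanCodeWithBackground(posts, color = "black", fontSize = 12):
--     html_content = ""
--     backgroundColor = "black"
--     for post in posts:
--         html_content += '<h1 style="color: %s; font-size: %s; backgroundColor: %s">%s</h1>\n' % (color, fontSize,  backgroundColor, post)
--         if (backgroundColor == "black"):
--             backgroundColor = "white"
--         else:
--             backgroundColor = "black"
--     return html_content
-- ===== SOURCE B (Python) =====
-- def generateHtmlSpanCodeWithBackground(posts, color="black", fontSize=12):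
--     fmt = '<h1 style="color: %s; font-size: %s; backgroundColor: %s">%s</h1>\n'
--     parts = []
--     i = 0
--     n = len(posts)
--     while i + 1 < n:
--         parts.append(fmt % (color, fontSize, "black", posts[i]))
--         parts.append(fmt % (color, fontSize, "white", posts[i + 1]))
--         i += 2
--     if i < n:
--         parts.append(fmt % (color, fontSize, "black", posts[i]))
--     return "".join(parts)
-- ===== Notes on version B (the rewrite author's own statement) =====
-- stated objective: alternative
-- what changed: Replaces the stateful black/white toggle with an index loop that consumes posts two at a time, emitting one black and one white line per step with the colors fixed (a separate trailing black line for an odd last post), collecting the lines in a list joined at the end; no mutable color state exists.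
import Mathlib
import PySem

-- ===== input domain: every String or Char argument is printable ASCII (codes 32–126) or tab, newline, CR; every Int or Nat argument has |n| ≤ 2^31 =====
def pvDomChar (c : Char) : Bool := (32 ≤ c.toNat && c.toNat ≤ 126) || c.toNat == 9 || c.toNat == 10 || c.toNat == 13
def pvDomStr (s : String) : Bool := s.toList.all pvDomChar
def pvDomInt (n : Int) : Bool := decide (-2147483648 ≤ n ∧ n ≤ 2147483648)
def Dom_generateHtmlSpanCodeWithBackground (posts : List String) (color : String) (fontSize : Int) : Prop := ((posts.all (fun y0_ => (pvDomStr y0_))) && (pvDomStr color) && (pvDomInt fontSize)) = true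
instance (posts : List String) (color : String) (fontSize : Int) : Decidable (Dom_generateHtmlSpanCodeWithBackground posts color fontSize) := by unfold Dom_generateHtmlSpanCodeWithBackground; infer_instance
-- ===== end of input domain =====

-- B replaces A's stateful black/white toggle loop by an index loop consuming the posts
-- two at a time (one black and one white line per step, colors fixed, a separate trailing
-- black line for an odd last post), collecting the lines in a list joined at the end
-- (objective: alternative).

-- the '%'-format line shared by both programs: '<h1 style="color: %s; font-size: %s; backgroundColor: %s">%s</h1>\n'
def pvFmt (color : String) (fontSize : Int) (bg post : String) : String :=
  "<h1 style=\"color: " ++ color ++ "; font-size: " ++ PySem.Int.toStr fontSize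
    ++ "; backgroundColor: " ++ bg ++ "\">" ++ post ++ "</h1>\n"

-- ===== PORT A =====
-- A's loop: accumulate html_content and flip the backgroundColor toggle each iteration
def pvALoop (color : String) (fontSize : Int) : List String → String → String → String
  | [], html, _ => html
  | post :: rest, html, bg =>
      pvALoop color fontSize rest (html ++ pvFmt color fontSize bg post)
        (if bg == "black" then "white" else "black")

def generateHtmlSpanCodeWithBackground (posts : List String) (color : String) (fontSize : Int) : String :=
  pvALoop color fontSize posts "" "black"

-- ===== PORT B =====
-- Source B's 'while i + 1 < n' loop: two posts per step, appending lines to parts;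
-- posts[i]/posts[i+1] are in range by the loop guard, so List.getD is exact here.
def pvBLoop (color : String) (fontSize : Int) (posts : List String) (n i : Nat) (parts : List String) : List String :=
  if i + 1 < n then
    pvBLoop color fontSize posts n (i + 2)
      (parts ++ [pvFmt color fontSize "black" (posts.getD i ""),
                 pvFmt color fontSize "white" (posts.getD (i + 1) "")])
  else if i < n then parts ++ [pvFmt color fontSize "black" (posts.getD i "")]
  else parts
termination_by n - i

def generateHtmlSpanCodeWithBackground_alt (posts : List String) (color : String) (fontSize : Int) : String :=
  PySem.Str.join "" (pvBLoop color fontSize posts posts.length 0 [])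

-- ===== PRECONDITION & SPEC =====
def Spec_generateHtmlSpanCodeWithBackground (posts : List String) (color : String) (fontSize : Int) (out : String) : Prop := out = generateHtmlSpanCodeWithBackground_alt posts color fontSize
instance (posts : List String) (color : String) (fontSize : Int) (out : String) : Decidable (Spec_generateHtmlSpanCodeWithBackground posts color fontSize out) := by unfold Spec_generateHtmlSpanCodeWithBackground; infer_instance

-- ===== CLAIM (what is proved, stated in full; the proofs are below) =====
def Claim_equal_generateHtmlSpanCodeWithBackground : Prop := ∀ (posts : List String) (color : String) (fontSize : Int), Dom_generateHtmlSpanCodeWithBackground posts color fontSize → Spec_generateHtmlSpanCodeWithBackground posts color fontSize (generateHtmlSpanCodeWithBackground posts color fontSize)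

-- ===== LEMMAS AND PROOFS =====

-- joining with the empty separator is flattening
theorem pv_chars_join_nil_sep (ls : List (List Char)) : PySem.Chars.join [] ls = ls.flatten := by
  induction ls with
  | nil => simp [PySem.Chars.join_nil]
  | cons a t ih =>
    cases t with
    | nil => simp [PySem.Chars.join_singleton]
    | cons b r => simp only [PySem.Chars.join_cons_cons] at *; simp [ih]

theorem pv_join_empty_nil : PySem.Str.join "" ([] : List String) = "" := by
  apply String.toList_injective
  simp [PySem.Str.toList_join]

theorem pv_join_empty_append (xs ys : List String) :
    PySem.Str.join "" (xs ++ ys) = PySem.Str.join "" xs ++ PySem.Str.join "" ys := by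
  apply String.toList_injective
  simp [PySem.Str.toList_join, pv_chars_join_nil_sep]

theorem pv_join_empty_one (x : String) : PySem.Str.join "" [x] = x := by
  apply String.toList_injective
  simp [PySem.Str.toList_join, pv_chars_join_nil_sep]

theorem pv_join_empty_two (x y : String) : PySem.Str.join "" [x, y] = x ++ y := by
  apply String.toList_injective
  simp [PySem.Str.toList_join, pv_chars_join_nil_sep]

-- the two loops agree from any index i: joining B's remaining work equals A's loop on the
-- suffix posts.drop i restarted with bg = "black"
theorem pvBLoop_eq_pvALoop (color : String) (fontSize : Int) (posts : List String) :
    ∀ (i : Nat) (parts : List String),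
      PySem.Str.join "" (pvBLoop color fontSize posts posts.length i parts)
        = pvALoop color fontSize (posts.drop i) (PySem.Str.join "" parts) "black" := by
  have key : ∀ (k i : Nat) (parts : List String), posts.length - i ≤ k →
      PySem.Str.join "" (pvBLoop color fontSize posts posts.length i parts)
        = pvALoop color fontSize (posts.drop i) (PySem.Str.join "" parts) "black" := by
    intro k
    induction k with
    | zero =>
      intro i parts hk
      rw [pvBLoop, if_neg (by omega), if_neg (by omega),
          List.drop_eq_nil_of_le (by omega)]
      simp [pvALoop]
    | succ k ih =>
      intro i parts hk
      rw [pvBLoop]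
      by_cases h1 : i + 1 < posts.length
      · have hi : i < posts.length := by omega
        have hd1 : posts.drop i = posts[i] :: posts.drop (i + 1) :=
          List.drop_eq_getElem_cons hi
        have hd2 : posts.drop (i + 1) = posts[i + 1] :: posts.drop (i + 2) :=
          List.drop_eq_getElem_cons h1
        rw [if_pos h1, ih (i + 2) _ (by omega)]
        rw [hd1, hd2]
        simp only [pvALoop]
        rw [if_pos (by decide : (("black" : String) == "black") = true),
            if_neg (by decide : ¬ (("white" : String) == "black") = true)]
        rw [List.getD_eq_getElem _ _ hi, List.getD_eq_getElem _ _ h1,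
            pv_join_empty_append, pv_join_empty_two, String.append_assoc]
      · rw [if_neg h1]
        by_cases h2 : i < posts.length
        · have hd1 : posts.drop i = posts[i] :: posts.drop (i + 1) :=
            List.drop_eq_getElem_cons h2
          have hd2 : posts.drop (i + 1) = [] := List.drop_eq_nil_of_le (by omega)
          rw [if_pos h2, hd1, hd2]
          simp only [pvALoop]
          rw [List.getD_eq_getElem _ _ h2, pv_join_empty_append, pv_join_empty_one]
        · rw [if_neg h2, List.drop_eq_nil_of_le (by omega)]
          simp [pvALoop]
  intro i parts
  exact key posts.length i parts (by omega)

-- ===== VERDICT (by name: the statement is the Claim_ definition above) =====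
theorem generateHtmlSpanCodeWithBackground_spec : Claim_equal_generateHtmlSpanCodeWithBackground := by
  intro posts color fontSize _
  unfold Spec_generateHtmlSpanCodeWithBackground generateHtmlSpanCodeWithBackground generateHtmlSpanCodeWithBackground_alt
  rw [pvBLoop_eq_pvALoop, pv_join_empty_nil]
  simp
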